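-- pv_equiv track=rewrite | github.com/MrBrantCode/unitest_baseline | mut_generate/mist_train_cf/cf_17063/solution.py | convert_list_to_dictionary
-- ===== SOURCE A (Python) =====
-- def convert_list_to_dictionary(lst):
--     unique_items = []
--     positions = {}
--
--     # Iterate through the list and keep track of the first occurrence of each item and its position
--     for i, item in enumerate(lst):
--         if item not in unique_items:
--             unique_items.append(item)
--             positions[item] = i
--
--     # Sort the dictionary in descending order based on the values. If two values are equal, sort them alphabetically in ascending order
--     sorted_dict = dict(sorted(positions.items(), key=lambda x: (-x[1], x[0])))
--
--     return sorted_dict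
-- ===== SOURCE B (Python) =====
-- def convert_list_to_dictionary(lst):
--     positions = {}
--     for i, item in enumerate(lst):
--         if item not in positions:
--             positions[item] = i
--     return dict(reversed(list(positions.items())))
-- ===== Notes on version B (the rewrite author's own statement) =====
-- stated objective: faster
-- what changed: B drops A's unique_items list (O(n) membership scans) and the sorted(..., key=(-index, key)) call: one dict pass records first-occurrence indices and the result is the reversed insertion order, which equals descending-index order because first-occurrence indices are strictly increasing (so A's alphabetical tiebreak never fires).
import Mathlib
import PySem

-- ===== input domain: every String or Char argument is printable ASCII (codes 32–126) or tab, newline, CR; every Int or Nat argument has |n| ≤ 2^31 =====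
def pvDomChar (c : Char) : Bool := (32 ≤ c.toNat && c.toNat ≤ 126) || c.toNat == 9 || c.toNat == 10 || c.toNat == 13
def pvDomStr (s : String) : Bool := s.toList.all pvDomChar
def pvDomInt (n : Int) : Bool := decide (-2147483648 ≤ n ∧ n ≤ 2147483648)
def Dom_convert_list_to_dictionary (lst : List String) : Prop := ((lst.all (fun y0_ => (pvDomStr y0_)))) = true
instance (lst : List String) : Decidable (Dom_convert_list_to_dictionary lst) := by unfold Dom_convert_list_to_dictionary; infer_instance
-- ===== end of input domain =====

-- B replaces A's unique_items list and sorted(..., key=(-index, key)) by one dict pass plus a reversal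
-- of the insertion order (first-occurrence indices are strictly increasing, so the tiebreak never fires).

-- ===== PORT A =====
def convert_list_to_dictionary (lst : List String) : List (String × Int) :=
  (PySem.Dict.ofList (PySem.List.sorted2
    ((PySem.List.enumerate lst).foldl
      (fun (st : List String × PySem.Dict String Int) p =>
        if p.2 ∈ st.1 then st
        else (st.1 ++ [p.2], st.2.insert p.2 p.1))
      ([], PySem.Dict.empty)).2.items
    (fun x => -x.2) (fun x => x.1))).items

-- ===== PORT B =====
def convert_list_to_dictionary_alt (lst : List String) : List (String × Int) :=
  (PySem.Dict.ofList
    ((PySem.List.enumerate lst).foldl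
      (fun (d : PySem.Dict String Int) p =>
        if d.contains p.2 then d else d.insert p.2 p.1)
      PySem.Dict.empty).items.reverse).items

-- ===== PRECONDITION & SPEC =====
def Spec_convert_list_to_dictionary (lst : List String) (out : List (String × Int)) : Prop := out = convert_list_to_dictionary_alt lst
instance (lst : List String) (out : List (String × Int)) : Decidable (Spec_convert_list_to_dictionary lst out) := by unfold Spec_convert_list_to_dictionary; infer_instance

-- ===== CLAIM (what is proved, stated in full; the proofs are below) =====
def Claim_equal_convert_list_to_dictionary : Prop := ∀ (lst : List String), Dom_convert_list_to_dictionary lst → Spec_convert_list_to_dictionary lst (convert_list_to_dictionary lst)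

-- ===== LEMMAS AND PROOFS =====

-- abbreviation for B's loop body (proof-side only)
def pvStepB (d : PySem.Dict String Int) (p : Int × String) : PySem.Dict String Int :=
  if d.contains p.2 then d else d.insert p.2 p.1

-- A's loop state is (keys of B's dict, B's dict)
lemma pvFoldA_eq (l : List (Int × String)) (d : PySem.Dict String Int) :
    l.foldl
      (fun (st : List String × PySem.Dict String Int) p =>
        if p.2 ∈ st.1 then st
        else (st.1 ++ [p.2], st.2.insert p.2 p.1))
      (d.keys, d)
    = ((l.foldl pvStepB d).keys, l.foldl pvStepB d) := by
  induction l generalizing d with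
  | nil => rfl
  | cons p t ih =>
    by_cases h : d.contains p.2 = true
    · have hm : p.2 ∈ d.keys := (PySem.Dict.contains_iff_mem_keys d p.2).mp h
      simp only [List.foldl_cons, pvStepB, if_pos hm, if_pos h]
      exact ih d
    · have hb : d.contains p.2 = false := by simpa using h
      have hm : ¬ p.2 ∈ d.keys := fun hmem => h ((PySem.Dict.contains_iff_mem_keys d p.2).mpr hmem)
      simp only [List.foldl_cons, pvStepB, if_neg hm, hb, if_false, Bool.false_eq_true]
      rw [show d.keys ++ [p.2] = (d.insert p.2 p.1).keys from
        (PySem.Dict.keys_insert_of_not_contains d p.1 hb).symm]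
      exact ih (d.insert p.2 p.1)

-- the values stored by B's loop are strictly increasing along the items list
lemma pvFoldB_pairwise (l : List (Int × String)) (d : PySem.Dict String Int) :
    l.Pairwise (fun p q => p.1 < q.1) →
    d.items.Pairwise (fun r q => r.2 < q.2) →
    (∀ r ∈ d.items, ∀ p ∈ l, r.2 < p.1) →
    (l.foldl pvStepB d).items.Pairwise (fun r q => r.2 < q.2) := by
  induction l generalizing d with
  | nil => intro _ hpw _; simpa using hpw
  | cons p t ih =>
    intro hl hpw hvals
    rcases List.pairwise_cons.mp hl with ⟨hp1, ht⟩
    by_cases h : d.contains p.2 = true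
    · simp only [List.foldl_cons, pvStepB, if_pos h]
      exact ih d ht hpw (fun r hr q hq => hvals r hr q (List.mem_cons_of_mem _ hq))
    · have hb : d.contains p.2 = false := by simpa using h
      simp only [List.foldl_cons, pvStepB, hb, Bool.false_eq_true, if_false]
      refine ih (d.insert p.2 p.1) ht ?_ ?_
      · rw [PySem.Dict.items_insert_of_not_contains d p.1 hb]
        refine List.pairwise_append.mpr ⟨hpw, by simp, ?_⟩
        intro r hr x hx
        simp only [List.mem_singleton] at hx
        subst hx
        exact hvals r hr p (List.mem_cons_self)
      · intro r hr q hq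
        rw [PySem.Dict.items_insert_of_not_contains d p.1 hb] at hr
        rcases List.mem_append.mp hr with hr | hr
        · exact hvals r hr q (List.mem_cons_of_mem _ hq)
        · simp only [List.mem_singleton] at hr
          subst hr
          exact hp1 q hq

lemma pvInsertBy_congr {α : Type} (f g : α → α → Bool) (x : α) (ys : List α)
    (h : ∀ y ∈ ys, f x y = g x y) :
    PySem.List.insertBy f x ys = PySem.List.insertBy g x ys := by
  induction ys with
  | nil => rfl
  | cons y t ih =>
    simp only [PySem.List.insertBy]
    rw [h y (List.mem_cons_self)]
    by_cases hg : g x y = true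
    · simp [hg]
    · simp only [Bool.not_eq_true] at hg
      simp [hg, ih (fun z hz => h z (List.mem_cons_of_mem _ hz))]

lemma pvFoldlInsertBy_congr {α : Type} (f g : α → α → Bool) (l acc : List α) (P : α → Prop)
    (hl : ∀ a ∈ l, P a) (hacc : ∀ a ∈ acc, P a)
    (hfg : ∀ a b, P a → P b → f a b = g a b) :
    l.foldl (fun acc x => PySem.List.insertBy f x acc) acc
      = l.foldl (fun acc x => PySem.List.insertBy g x acc) acc := by
  induction l generalizing acc with
  | nil => rfl
  | cons a t ih =>
    have ha : P a := hl a (List.mem_cons_self)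
    simp only [List.foldl_cons]
    rw [pvInsertBy_congr f g a acc (fun y hy => hfg a y ha (hacc y hy))]
    exact ih (PySem.List.insertBy g a acc)
      (fun b hb => hl b (List.mem_cons_of_mem _ hb))
      (fun b hb => by
        rcases (PySem.List.mem_insertBy g a b acc).mp hb with hb | hb
        · exact hb ▸ ha
        · exact hacc b hb)

-- with pairwise-distinct values, A's tuple key collapses to the primary key
lemma pvSorted2_eq_sorted (items : List (String × Int))
    (hne : ∀ a ∈ items, ∀ b ∈ items, a ≠ b → a.2 ≠ b.2) :
    PySem.List.sorted2 items (fun x => -x.2) (fun x => x.1)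
      = PySem.List.sorted items (fun x => -x.2) := by
  simp only [PySem.List.sorted2, PySem.List.sorted, if_neg (by decide : ¬ (false = true))]
  refine pvFoldlInsertBy_congr _ _ items [] (· ∈ items) (fun a ha => ha) (by simp) ?_
  intro a b ha hb
  by_cases hab : a = b
  · subst hab; simp
  · have h2 : a.2 ≠ b.2 := hne a ha b hb hab
    rcases lt_trichotomy a.2 b.2 with h | h | h
    · simp [show ¬(-a.2 < -b.2) by omega, show -b.2 < -a.2 by omega]
    · exact absurd h h2
    · simp [show -a.2 < -b.2 by omega]

-- ===== VERDICT (by name: the statement is the Claim_ definition above) =====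
theorem convert_list_to_dictionary_spec : Claim_equal_convert_list_to_dictionary := by
  intro lst _
  unfold Spec_convert_list_to_dictionary convert_list_to_dictionary convert_list_to_dictionary_alt
  have hA := pvFoldA_eq (PySem.List.enumerate lst) PySem.Dict.empty
  simp only [PySem.Dict.keys_empty] at hA
  -- A's folded dict is B's folded dict
  set dB := (PySem.List.enumerate lst).foldl pvStepB PySem.Dict.empty with hdB
  rw [hA]
  -- items of dB are strictly increasing in their values
  have hpw : dB.items.Pairwise (fun r q => r.2 < q.2) := by
    rw [hdB]
    exact pvFoldB_pairwise _ _ (PySem.List.pairwise_lt_enumerate lst 0)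
      (by simp [PySem.Dict.empty]) (by simp [PySem.Dict.empty])

  have hne : ∀ a ∈ dB.items, ∀ b ∈ dB.items, a ≠ b → a.2 ≠ b.2 :=
    (hpw.imp (fun {a b} h => Int.ne_of_lt h)).forall
      (fun _ _ h => Ne.symm h)
  rw [pvSorted2_eq_sorted dB.items hne]
  rw [PySem.List.sorted_eq_of_perm_of_pairwise_lt dB.items dB.items.reverse (fun x => -x.2)
    dB.items.reverse_perm
    (List.pairwise_reverse.mpr (hpw.imp (fun {a b} h => by dsimp only; omega)))]
  rfl
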